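-- pv_equiv track=rewrite | github.com/t3rmin41/tribe-of-ai-python | test.py | shapeArea
-- ===== SOURCE A (Python) =====
-- def shapeArea(n):
--     if n < 1:
--         return 0
--     areaCrossPart = 4*n - 4 + 1
--     areaAddedSquares = 0
--     i = 2
--     while (n - i > 0) :
--         areaAddedSquares += n - i
--         i += 1
--     return areaCrossPart + areaAddedSquares * 4
-- ===== SOURCE B (Python) =====
-- def shapeArea(n):
--     if n < 1:
--         return 0
--     return 2*n*n - 2*n + 1
-- ===== Notes on version B (the rewrite author's own statement) =====
-- stated objective: faster
-- what changed: Replaced the O(n) while-loop accumulation of n-i terms with the closed-form formula 2n^2-2n+1.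
import Mathlib
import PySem

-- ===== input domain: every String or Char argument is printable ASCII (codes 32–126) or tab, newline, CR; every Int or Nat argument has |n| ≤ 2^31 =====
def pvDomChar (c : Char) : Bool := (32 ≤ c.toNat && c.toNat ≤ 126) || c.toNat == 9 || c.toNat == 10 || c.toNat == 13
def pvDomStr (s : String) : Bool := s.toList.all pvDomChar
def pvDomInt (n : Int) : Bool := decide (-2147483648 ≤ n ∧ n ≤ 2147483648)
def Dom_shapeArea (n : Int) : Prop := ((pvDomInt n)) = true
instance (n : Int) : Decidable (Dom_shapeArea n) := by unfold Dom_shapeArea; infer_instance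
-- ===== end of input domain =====

-- B replaces A's O(n) while-loop summation with the closed form 2n^2-2n+1 (asymptotically faster).


-- ===== PORT A =====
-- while (n - i > 0): areaAddedSquares += n - i; i += 1
def shapeAreaLoop (n i acc : Int) : Int :=
  if _h : n - i > 0 then shapeAreaLoop n (i + 1) (acc + (n - i)) else acc
termination_by (n - i).toNat
decreasing_by omega

def shapeArea (n : Int) : Int :=
  if n < 1 then 0
  else
    let areaCrossPart := 4 * n - 4 + 1
    let areaAddedSquares := shapeAreaLoop n 2 0
    areaCrossPart + areaAddedSquares * 4

-- ===== PORT B =====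
def shapeArea_alt (n : Int) : Int :=
  if n < 1 then 0 else 2 * n * n - 2 * n + 1

-- ===== PRECONDITION & SPEC =====
def Spec_shapeArea (n : Int) (out : Int) : Prop := out = shapeArea_alt n
instance (n : Int) (out : Int) : Decidable (Spec_shapeArea n out) := by unfold Spec_shapeArea; infer_instance

-- ===== CLAIM (what is proved, stated in full; the proofs are below) =====
def Claim_equal_shapeArea : Prop := ∀ (n : Int), Dom_shapeArea n → Spec_shapeArea n (shapeArea n)

-- ===== LEMMAS AND PROOFS =====
-- Loop invariant: doubled to keep the arithmetic over Int (triangular number of n - i).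
theorem shapeAreaLoop_eq (k : Nat) : ∀ (n i acc : Int), n - i = (k : Int) →
    2 * shapeAreaLoop n i acc = 2 * acc + (k : Int) * ((k : Int) + 1) := by
  induction k with
  | zero =>
    intro n i acc h
    rw [shapeAreaLoop]
    simp only [show ¬(n - i > 0) by omega, dite_false]
    push_cast
    ring
  | succ m ih =>
    intro n i acc h
    rw [shapeAreaLoop]
    simp only [show n - i > 0 by omega, dite_true]
    rw [ih n (i + 1) (acc + (n - i)) (by omega)]
    push_cast
    have : n - i = (m : Int) + 1 := by push_cast at h; omega
    rw [this]; ring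

-- ===== VERDICT (by name: the statement is the Claim_ definition above) =====
theorem shapeArea_spec : Claim_equal_shapeArea := by
  intro n _
  unfold Spec_shapeArea shapeArea shapeArea_alt
  by_cases h : n < 1
  · simp [h]
  · simp only [h, if_false]
    by_cases h1 : n < 2
    · have hn : n = 1 := by omega
      subst hn
      rw [shapeAreaLoop]
      norm_num
    · have h2 : n - 2 = ((n - 2).toNat : Int) := by omega
      have := shapeAreaLoop_eq (n - 2).toNat n 2 0 h2
      rw [← h2] at this
      nlinarith [this]
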